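-- pv_equiv track=rewrite | github.com/dklarin/rezervacije-flask | metode/kalendar.py | izvlacenje_aktivnih
-- ===== SOURCE A (Python) =====
-- def dolazak_odlazak(sve_retke, redak):
--     dolazak = sve_retke[redak]['dolazak']
--     odlazak = sve_retke[redak]['odlazak']
--     lista = []
--     for i in range(int(dolazak[0:2]), int(odlazak[0:2]) + 1):
--         lista.append(i)
--     return dolazak, odlazak, lista
--
-- def kreiranje_zauzetosti(lista, mjesec):
--     dani = []
--     aktivni = []
--     if mjesec == 6 or mjesec == 9:
--         broj = 31
--     else:
--         broj = 32
--
--     for i in range(1, broj):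
--         dani.append(i)
--         if i in lista:
--             aktivni.append('active')
--         else:
--             aktivni.append('')
--     return dani, aktivni
--
-- def izvlacenje_aktivnih(sve_retke, lista):
--     rjecnik6 = {}
--     rjecnik7 = {}
--     rjecnik8 = {}
--     rjecnik9 = {}
--     dani6 = []
--     dani7 = []
--     dani8 = []
--     dani9 = []
--
--     for i in range(len(lista)):
--         dolazak, odlazak, lista_dana = dolazak_odlazak(sve_retke, lista[i] - 2)
--         # Dolazak i odlazak u 6. mjesecu
--         if dolazak[3:5] == '06':
--             dani6, aktivni6 = kreiranje_zauzetosti(lista_dana, 6)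
--             rjecnik6['lista' + str(i)] = aktivni6
--         # Dolazak u 6. mjesecu, odlazak u 7. mjesecu
--         if dolazak[3:5] == '06' and odlazak[3:5] == '07':
--             if int(dolazak[0:2]) <= 30 and dolazak[3:5] == '06':
--                 lista_brojeva = list(range(int(dolazak[0:2]), 31))
--                 dani6, aktivni6 = kreiranje_zauzetosti(lista_brojeva, 6)
--                 rjecnik6['lista'+ str(i)] = aktivni6
--             if int(odlazak[0:2]) >= 1 and odlazak[3:5] == '07':
--                 lista_brojeva = list(range(1, int(odlazak[0:2]) + 1))
--                 dani7, aktivni7 = kreiranje_zauzetosti(lista_brojeva, 7)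
--                 rjecnik7['lista' + str(i)] = aktivni7
--         # Dolazak i odlazak u 7. mjesecu
--         if dolazak[3:5] == '07':
--             dani7, aktivni7 = kreiranje_zauzetosti(lista_dana, 7)
--             rjecnik7['lista' + str(i)] = aktivni7
--         # Dolazak u 7. mjesecu, odlazak u 8. mjesecu
--         if dolazak[3:5] == '07' and odlazak[3:5] == '08':
--             if int(dolazak[0:2]) <= 31 and dolazak[3:5] == '07':
--                 lista_brojeva = list(range(int(dolazak[0:2]), 32))
--                 dani7, aktivni7 = kreiranje_zauzetosti(lista_brojeva, 7)
--                 rjecnik7['lista'+ str(i)] = aktivni7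
--             if int(odlazak[0:2]) >= 1 and odlazak[3:5] == '08':
--                 lista_brojeva = list(range(1, int(odlazak[0:2]) + 1))
--                 dani8, aktivni8 = kreiranje_zauzetosti(lista_brojeva, 8)
--                 rjecnik8['lista' + str(i)] = aktivni8
--         # Dolazak i odlazak u 8. mjesecu
--         if dolazak[3:5] == '08':
--             dani8, aktivni8 = kreiranje_zauzetosti(lista_dana, 8)
--             rjecnik8['lista' + str(i)] = aktivni8
--         # Dolazak u 8. mjesecu, odlazak u 9. mjesecu
--         if dolazak[3:5] == '08' and odlazak[3:5] == '09':
--             if int(dolazak[0:2]) <= 31 and dolazak[3:5] == '08':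
--                 lista_brojeva = list(range(int(dolazak[0:2]), 32))
--                 dani8, aktivni8 = kreiranje_zauzetosti(lista_brojeva, 8)
--                 rjecnik8['lista'+ str(i)] = aktivni8
--             if int(odlazak[0:2]) >= 1 and odlazak[3:5] == '09':
--                 lista_brojeva = list(range(1, int(odlazak[0:2]) + 1))
--                 dani9, aktivni9 = kreiranje_zauzetosti(lista_brojeva, 9)
--                 rjecnik9['lista' + str(i)] = aktivni9
--         # Dolazak i odlazak u 9. mjesecu
--         if dolazak[3:5] == '09':
--             dani9, aktivni9 = kreiranje_zauzetosti(lista_dana, 9)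
--             rjecnik9['lista' + str(i)] = aktivni9
--
--     return rjecnik6, rjecnik7, rjecnik8, rjecnik9, dani6, dani7, dani8, dani9
-- ===== SOURCE B (Python) =====
-- # Closed-form segment construction: each contiguous stay is rendered as three replicated
-- # slices (''*pre + 'active'*overlap + ''*post) instead of per-day membership scans.
-- def izvlacenje_aktivnih(sve_retke, lista):
--     def mark(lo, hi, nd):
--         # days 1..nd, 'active' exactly on the overlap with [lo, hi]
--         s = min(max(lo - 1, 0), nd)
--         e = min(max(hi, s), nd)
--         return [''] * s + ['active'] * (e - s) + [''] * (nd - e)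
--
--     month_len = {'06': 30, '07': 31, '08': 31, '09': 30}
--     nxt = {'06': '07', '07': '08', '08': '09'}
--     rj = {m: {} for m in month_len}
--     dn = {m: [] for m in month_len}
--
--     for i, r in enumerate(lista):
--         row = sve_retke[r - 2]
--         dd, od = row['dolazak'], row['odlazak']
--         a, b = int(dd[0:2]), int(od[0:2])
--         am, bm = dd[3:5], od[3:5]
--         if am in month_len:
--             nd = month_len[am]
--             key = 'lista' + str(i)
--             cross = nxt.get(am) == bm
--             rj[am][key] = mark(a, nd, nd) if (cross and a <= nd) else mark(a, b, nd)
--             dn[am] = list(range(1, nd + 1))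
--             if cross and b >= 1:
--                 nd2 = month_len[bm]
--                 rj[bm][key] = mark(1, b, nd2)
--                 dn[bm] = list(range(1, nd2 + 1))
--     return rj['06'], rj['07'], rj['08'], rj['09'], dn['06'], dn['07'], dn['08'], dn['09']
-- ===== Notes on version B (the rewrite author's own statement) =====
-- stated objective: alternative
-- what changed: Replaced A's per-day membership scans of appended day lists (four copy-pasted month blocks, assign-then-overwrite) by closed-form segment construction: each contiguous stay becomes ''*pre + 'active'*overlap + ''*post via clamping arithmetic, with one month-length/next-month lookup and a single final assignment per dict key.
import Mathlib
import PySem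

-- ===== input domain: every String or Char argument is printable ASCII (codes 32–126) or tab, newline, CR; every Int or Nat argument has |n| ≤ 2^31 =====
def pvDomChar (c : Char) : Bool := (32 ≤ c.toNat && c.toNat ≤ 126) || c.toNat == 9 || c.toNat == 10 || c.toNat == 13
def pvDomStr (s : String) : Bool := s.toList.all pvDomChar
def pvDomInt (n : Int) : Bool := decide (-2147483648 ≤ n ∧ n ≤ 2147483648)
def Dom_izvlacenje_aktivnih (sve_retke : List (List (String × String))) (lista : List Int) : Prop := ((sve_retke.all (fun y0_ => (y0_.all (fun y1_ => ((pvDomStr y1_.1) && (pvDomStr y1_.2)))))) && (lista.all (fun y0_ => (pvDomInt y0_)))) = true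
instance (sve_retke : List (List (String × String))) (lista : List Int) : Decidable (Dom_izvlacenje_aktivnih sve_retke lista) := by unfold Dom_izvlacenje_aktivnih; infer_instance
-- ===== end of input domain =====

-- B replaces A's per-day membership scans and four copy-pasted month blocks by closed-form
-- segment construction (''*pre + 'active'*overlap + ''*post); objective: alternative.
-- Return-value equivalence only (no argument is mutated).

-- ===== PORT A =====
-- port of helper dolazak_odlazak; `none` exactly where the Python raises (IndexError / KeyError /
-- ValueError).  It also carries the parsed days int(dolazak[0:2]) / int(odlazak[0:2]) — the very
-- values the Python recomputes from the same slices inside the branches of the main loop.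
def pvDolazakOdlazak? (sve_retke : List (List (String × String))) (redak : Int) :
    Option (String × String × Int × Int × List Int) :=
  match PySem.List.pyGet? sve_retke redak with
  | none => none
  | some row =>
    match (PySem.Dict.mk row).get? "dolazak", (PySem.Dict.mk row).get? "odlazak" with
    | some dolazak, some odlazak =>
      match PySem.Int.ofStr? (PySem.Str.slice dolazak (some 0) (some 2)),
            PySem.Int.ofStr? (PySem.Str.slice odlazak (some 0) (some 2)) with
      | some a, some b =>
        -- for i in range(int(dolazak[0:2]), int(odlazak[0:2]) + 1): lista.append(i)
        some (dolazak, odlazak, a, b,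
          (PySem.List.pyRange a (b + 1) 1).foldl (fun acc i => acc ++ [i]) [])
      | _, _ => none
    | _, _ => none

-- port of helper kreiranje_zauzetosti (the two appends per day, as in the Python)
def pvKreiranjeZauzetosti (lista : List Int) (mjesec : Int) : List Int × List String :=
  let broj : Int := if mjesec = 6 ∨ mjesec = 9 then 31 else 32
  (PySem.List.pyRange 1 broj 1).foldl
    (fun (p : List Int × List String) i =>
      (p.1 ++ [i], p.2 ++ [if lista.contains i then "active" else ""])) ([], [])

-- the 8 loop variables of A: rjecnik6..9 (dicts), dani6..9 (lists)
abbrev pvSA := PySem.Dict String (List String) × PySem.Dict String (List String) ×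
  PySem.Dict String (List String) × PySem.Dict String (List String) ×
  List Int × List Int × List Int × List Int

-- one iteration of A's main loop (a nested `if c1: if c2:` is written `if c1 ∧ c2`)
def pvStepA (sve_retke : List (List (String × String))) (lista : List Int)
    (s : pvSA) (i : Int) : pvSA :=
  match pvDolazakOdlazak? sve_retke (PySem.List.pyGetD lista i 0 - 2) with
  | none => s        -- the Python raises here; excluded by Pre_
  | some (dolazak, odlazak, a, b, lista_dana) =>
    let (r6, r7, r8, r9, d6, d7, d8, d9) := s
    let am := PySem.Str.slice dolazak (some 3) (some 5)
    let bm := PySem.Str.slice odlazak (some 3) (some 5)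
    let key := "lista" ++ PySem.Int.toStr i
    -- if dolazak[3:5] == '06':
    let (r6, d6) := if am = "06" then
        let p := pvKreiranjeZauzetosti lista_dana 6
        (r6.insert key p.2, p.1) else (r6, d6)
    -- if dolazak[3:5] == '06' and odlazak[3:5] == '07':  (two inner ifs)
    let (r6, d6) := if (am = "06" ∧ bm = "07") ∧ (a ≤ 30 ∧ am = "06") then
        let p := pvKreiranjeZauzetosti (PySem.List.pyRange a 31 1) 6
        (r6.insert key p.2, p.1) else (r6, d6)
    let (r7, d7) := if (am = "06" ∧ bm = "07") ∧ (1 ≤ b ∧ bm = "07") then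
        let p := pvKreiranjeZauzetosti (PySem.List.pyRange 1 (b + 1) 1) 7
        (r7.insert key p.2, p.1) else (r7, d7)
    -- if dolazak[3:5] == '07':
    let (r7, d7) := if am = "07" then
        let p := pvKreiranjeZauzetosti lista_dana 7
        (r7.insert key p.2, p.1) else (r7, d7)
    -- if dolazak[3:5] == '07' and odlazak[3:5] == '08':
    let (r7, d7) := if (am = "07" ∧ bm = "08") ∧ (a ≤ 31 ∧ am = "07") then
        let p := pvKreiranjeZauzetosti (PySem.List.pyRange a 32 1) 7
        (r7.insert key p.2, p.1) else (r7, d7)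
    let (r8, d8) := if (am = "07" ∧ bm = "08") ∧ (1 ≤ b ∧ bm = "08") then
        let p := pvKreiranjeZauzetosti (PySem.List.pyRange 1 (b + 1) 1) 8
        (r8.insert key p.2, p.1) else (r8, d8)
    -- if dolazak[3:5] == '08':
    let (r8, d8) := if am = "08" then
        let p := pvKreiranjeZauzetosti lista_dana 8
        (r8.insert key p.2, p.1) else (r8, d8)
    -- if dolazak[3:5] == '08' and odlazak[3:5] == '09':
    let (r8, d8) := if (am = "08" ∧ bm = "09") ∧ (a ≤ 31 ∧ am = "08") then
        let p := pvKreiranjeZauzetosti (PySem.List.pyRange a 32 1) 8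
        (r8.insert key p.2, p.1) else (r8, d8)
    let (r9, d9) := if (am = "08" ∧ bm = "09") ∧ (1 ≤ b ∧ bm = "09") then
        let p := pvKreiranjeZauzetosti (PySem.List.pyRange 1 (b + 1) 1) 9
        (r9.insert key p.2, p.1) else (r9, d9)
    -- if dolazak[3:5] == '09':
    let (r9, d9) := if am = "09" then
        let p := pvKreiranjeZauzetosti lista_dana 9
        (r9.insert key p.2, p.1) else (r9, d9)
    (r6, r7, r8, r9, d6, d7, d8, d9)

def izvlacenje_aktivnih (sve_retke : List (List (String × String))) (lista : List Int) :
    (List (String × List String)) × (List (String × List String)) × (List (String × List String)) ×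
    (List (String × List String)) × List Int × List Int × List Int × List Int :=
  let s := (PySem.List.pyRange 0 (PySem.List.len lista) 1).foldl
    (pvStepA sve_retke lista) (.empty, .empty, .empty, .empty, [], [], [], [])
  (s.1.items, s.2.1.items, s.2.2.1.items, s.2.2.2.1.items, s.2.2.2.2)

-- ===== PORT B =====
-- mark(lo, hi, nd): three replicated segments (['']*s is list-repeat, i.e. pyRepeat)
def pvMark (lo hi nd : Int) : List String :=
  let s := min (max (lo - 1) 0) nd
  let e := min (max hi s) nd
  PySem.List.pyRepeat [""] s ++ PySem.List.pyRepeat ["active"] (e - s) ++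
    PySem.List.pyRepeat [""] (nd - e)

-- month_len = {'06': 30, '07': 31, '08': 31, '09': 30}
def pvMonthLen : PySem.Dict String Int := .mk [("06", 30), ("07", 31), ("08", 31), ("09", 30)]
-- nxt = {'06': '07', '07': '08', '08': '09'}
def pvNxt : PySem.Dict String String := .mk [("06", "07"), ("07", "08"), ("08", "09")]

-- B's state: rj (dict month → dict), dn (dict month → day list)
abbrev pvSB := PySem.Dict String (PySem.Dict String (List String)) × PySem.Dict String (List Int)

-- body of B's loop `for i, r in enumerate(lista): ...`
def pvStepB (sve_retke : List (List (String × String))) (s : pvSB) (p : Int × Int) : pvSB :=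
  match PySem.List.pyGet? sve_retke (p.2 - 2) with
  | none => s        -- the Python raises here; excluded by Pre_
  | some row =>
    match (PySem.Dict.mk row).get? "dolazak", (PySem.Dict.mk row).get? "odlazak" with
    | some dd, some od =>
      match PySem.Int.ofStr? (PySem.Str.slice dd (some 0) (some 2)),
            PySem.Int.ofStr? (PySem.Str.slice od (some 0) (some 2)) with
      | some a, some b =>
        let am := PySem.Str.slice dd (some 3) (some 5)
        let bm := PySem.Str.slice od (some 3) (some 5)
        if pvMonthLen.contains am then
          let nd := pvMonthLen.getD am 0
          let key := "lista" ++ PySem.Int.toStr p.1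
          let cross := pvNxt.get? am = some bm
          let rj := s.1.insert am ((s.1.getD am .empty).insert key
            (if cross ∧ a ≤ nd then pvMark a nd nd else pvMark a b nd))
          let dn := s.2.insert am (PySem.List.pyRange 1 (nd + 1) 1)
          if cross ∧ 1 ≤ b then
            let nd2 := pvMonthLen.getD bm 0
            (rj.insert bm ((rj.getD bm .empty).insert key (pvMark 1 b nd2)),
             dn.insert bm (PySem.List.pyRange 1 (nd2 + 1) 1))
          else (rj, dn)
        else s
      | _, _ => s
    | _, _ => s

def izvlacenje_aktivnih_alt (sve_retke : List (List (String × String))) (lista : List Int) :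
    (List (String × List String)) × (List (String × List String)) × (List (String × List String)) ×
    (List (String × List String)) × List Int × List Int × List Int × List Int :=
  let s := (PySem.List.enumerate lista 0).foldl (pvStepB sve_retke)
    (.mk [("06", .empty), ("07", .empty), ("08", .empty), ("09", .empty)],
     .mk [("06", []), ("07", []), ("08", []), ("09", [])])
  ((s.1.getD "06" .empty).items, (s.1.getD "07" .empty).items,
   (s.1.getD "08" .empty).items, (s.1.getD "09" .empty).items,
   s.2.getD "06" [], s.2.getD "07" [], s.2.getD "08" [], s.2.getD "09" [])

-- ===== PRECONDITION & SPEC =====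
-- a referenced row exists, has both keys, and both day prefixes parse as int
def pvRowOk (row : List (String × String)) : Bool :=
  match (PySem.Dict.mk row).get? "dolazak", (PySem.Dict.mk row).get? "odlazak" with
  | some d, some o =>
      (PySem.Int.ofStr? (PySem.Str.slice d (some 0) (some 2))).isSome &&
      (PySem.Int.ofStr? (PySem.Str.slice o (some 0) (some 2))).isSome
  | _, _ => false

-- exactly the inputs on which the Python A returns normally: every reservation index r in lista
-- reaches a row sve_retke[r-2] (Python indexing), with 'dolazak'/'odlazak' keys whose first two
-- characters parse as int; otherwise A raises IndexError/KeyError/ValueError.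
def Pre_izvlacenje_aktivnih (sve_retke : List (List (String × String))) (lista : List Int) : Prop :=
  ∀ r ∈ lista, ((PySem.List.pyGet? sve_retke (r - 2)).map pvRowOk).getD false = true
instance (sve_retke : List (List (String × String))) (lista : List Int) : Decidable (Pre_izvlacenje_aktivnih sve_retke lista) := by unfold Pre_izvlacenje_aktivnih; infer_instance

def pvWitness_izvlacenje_aktivnih : (List (List (String × String))) × List Int :=
  ([[("dolazak", "28.06."), ("odlazak", "03.07.")], [("dolazak", "05.07."), ("odlazak", "09.07.")]], [2, 3])

def Spec_izvlacenje_aktivnih (sve_retke : List (List (String × String))) (lista : List Int) (out : (List (String × List String)) × (List (String × List String)) × (List (String × List String)) × (List (String × List String)) × List Int × List Int × List Int × List Int) : Prop := out = izvlacenje_aktivnih_alt sve_retke lista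
instance (sve_retke : List (List (String × String))) (lista : List Int) (out : (List (String × List String)) × (List (String × List String)) × (List (String × List String)) × (List (String × List String)) × List Int × List Int × List Int × List Int) : Decidable (Spec_izvlacenje_aktivnih sve_retke lista out) := by
  unfold Spec_izvlacenje_aktivnih
  letI i2 : DecidableEq (List Int × List Int) := instDecidableEqProd
  letI i3 : DecidableEq (List Int × List Int × List Int) := instDecidableEqProd
  letI i4 : DecidableEq (List Int × List Int × List Int × List Int) := instDecidableEqProd
  letI i5 : DecidableEq (List (String × List String) × List Int × List Int × List Int × List Int) := instDecidableEqProd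
  letI i6 : DecidableEq (List (String × List String) × List (String × List String) × List Int × List Int × List Int × List Int) := instDecidableEqProd
  letI i7 : DecidableEq (List (String × List String) × List (String × List String) × List (String × List String) × List Int × List Int × List Int × List Int) := instDecidableEqProd
  letI i8 : DecidableEq (List (String × List String) × List (String × List String) × List (String × List String) × List (String × List String) × List Int × List Int × List Int × List Int) := instDecidableEqProd
  exact i8 out (izvlacenje_aktivnih_alt sve_retke lista)

-- ===== CLAIM (what is proved, stated in full; the proofs are below) =====
def Claim_equal_izvlacenje_aktivnih : Prop := ∀ (sve_retke : List (List (String × String))) (lista : List Int), Dom_izvlacenje_aktivnih sve_retke lista → Pre_izvlacenje_aktivnih sve_retke lista → Spec_izvlacenje_aktivnih sve_retke lista (izvlacenje_aktivnih sve_retke lista)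

-- ===== LEMMAS AND PROOFS =====

-- A's helper computes (full day list, membership-marked list)
theorem pvKre_eq (lista : List Int) (mjesec : Int) :
    pvKreiranjeZauzetosti lista mjesec =
      (PySem.List.pyRange 1 (if mjesec = 6 ∨ mjesec = 9 then 31 else 32) 1,
       (PySem.List.pyRange 1 (if mjesec = 6 ∨ mjesec = 9 then 31 else 32) 1).map
         (fun i => if lista.contains i then "active" else "")) := by
  unfold pvKreiranjeZauzetosti
  rw [PySem.List.foldl_prod_mk (f := fun acc i => acc ++ [i])
    (g := fun acc i => acc ++ [if lista.contains i then "active" else ""])]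
  rw [PySem.List.foldl_append_singleton_eq_self,
    PySem.List.foldl_append_singleton_eq_map]
  simp

-- A's appended day list is just the range
theorem pvListaDana_eq (a b : Int) :
    (PySem.List.pyRange a (b + 1) 1).foldl (fun acc i => acc ++ [i]) [] =
      PySem.List.pyRange a (b + 1) 1 := by
  rw [PySem.List.foldl_append_singleton_eq_self]; simp

-- B's closed-form segments equal A's per-day membership marking of the contiguous range
theorem pvMark_eq (lo hi nd : Int) (h : 0 ≤ nd) :
    pvMark lo hi nd = (PySem.List.pyRange 1 (nd + 1) 1).map
      (fun i => if (PySem.List.pyRange lo (hi + 1) 1).contains i then "active" else "") := by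
  simp only [pvMark]
  set s := min (max (lo - 1) 0) nd with hs
  set e := min (max hi s) nd with he
  have hs0 : 0 ≤ s := by omega
  have hse : s ≤ e := by omega
  have hen : e ≤ nd := by omega
  rw [PySem.List.pyRange_one_append 1 (s + 1) (nd + 1) (by omega) (by omega),
    PySem.List.pyRange_one_append (s + 1) (e + 1) (nd + 1) (by omega) (by omega),
    List.map_append, List.map_append]
  rw [PySem.List.pyRepeat_singleton, PySem.List.pyRepeat_singleton, PySem.List.pyRepeat_singleton]
  have h1 : ∀ i ∈ PySem.List.pyRange 1 (s + 1) 1,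
      (if (PySem.List.pyRange lo (hi + 1) 1).contains i then "active" else "") = "" := by
    intro i hi_
    rw [PySem.List.mem_pyRange_one] at hi_
    rw [if_neg]
    simp only [List.contains_iff_mem, PySem.List.mem_pyRange_one]
    omega
  have h2 : ∀ i ∈ PySem.List.pyRange (s + 1) (e + 1) 1,
      (if (PySem.List.pyRange lo (hi + 1) 1).contains i then "active" else "") = "active" := by
    intro i hi_
    rw [PySem.List.mem_pyRange_one] at hi_
    rw [if_pos]
    simp only [List.contains_iff_mem, PySem.List.mem_pyRange_one]
    omega
  have h3 : ∀ i ∈ PySem.List.pyRange (e + 1) (nd + 1) 1,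
      (if (PySem.List.pyRange lo (hi + 1) 1).contains i then "active" else "") = "" := by
    intro i hi_
    rw [PySem.List.mem_pyRange_one] at hi_
    rw [if_neg]
    simp only [List.contains_iff_mem, PySem.List.mem_pyRange_one]
    omega
  rw [List.map_congr_left h1, List.map_congr_left h2, List.map_congr_left h3,
    List.map_const', List.map_const', List.map_const',
    PySem.List.length_pyRange_one, PySem.List.length_pyRange_one, PySem.List.length_pyRange_one]
  have c1 : (s + 1 - 1).toNat = s.toNat := by omega
  have c2 : (e + 1 - (s + 1)).toNat = (e - s).toNat := by omega
  have c3 : (nd + 1 - (e + 1)).toNat = (nd - e).toNat := by omega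
  rw [c1, c2, c3, List.append_assoc]

-- reductions of the literal month-keyed dicts (proof helpers; values abstract, keys literal)
theorem pvIns06 {a : Type} (v1 v2 v3 v4 x : a) :
    (PySem.Dict.mk [("06", v1), ("07", v2), ("08", v3), ("09", v4)]).insert "06" x =
      PySem.Dict.mk [("06", x), ("07", v2), ("08", v3), ("09", v4)] := rfl
theorem pvIns07 {a : Type} (v1 v2 v3 v4 x : a) :
    (PySem.Dict.mk [("06", v1), ("07", v2), ("08", v3), ("09", v4)]).insert "07" x =
      PySem.Dict.mk [("06", v1), ("07", x), ("08", v3), ("09", v4)] := rfl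
theorem pvIns08 {a : Type} (v1 v2 v3 v4 x : a) :
    (PySem.Dict.mk [("06", v1), ("07", v2), ("08", v3), ("09", v4)]).insert "08" x =
      PySem.Dict.mk [("06", v1), ("07", v2), ("08", x), ("09", v4)] := rfl
theorem pvIns09 {a : Type} (v1 v2 v3 v4 x : a) :
    (PySem.Dict.mk [("06", v1), ("07", v2), ("08", v3), ("09", v4)]).insert "09" x =
      PySem.Dict.mk [("06", v1), ("07", v2), ("08", v3), ("09", x)] := rfl
theorem pvGet06 {a : Type} (v1 v2 v3 v4 d : a) :
    (PySem.Dict.mk [("06", v1), ("07", v2), ("08", v3), ("09", v4)]).getD "06" d = v1 := rfl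
theorem pvGet07 {a : Type} (v1 v2 v3 v4 d : a) :
    (PySem.Dict.mk [("06", v1), ("07", v2), ("08", v3), ("09", v4)]).getD "07" d = v2 := rfl
theorem pvGet08 {a : Type} (v1 v2 v3 v4 d : a) :
    (PySem.Dict.mk [("06", v1), ("07", v2), ("08", v3), ("09", v4)]).getD "08" d = v3 := rfl
theorem pvGet09 {a : Type} (v1 v2 v3 v4 d : a) :
    (PySem.Dict.mk [("06", v1), ("07", v2), ("08", v3), ("09", v4)]).getD "09" d = v4 := rfl

-- one simp bundle per fact family
theorem pvDict4Len : pvMonthLen.contains "06" = true ∧ pvMonthLen.contains "07" = true ∧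
    pvMonthLen.contains "08" = true ∧ pvMonthLen.contains "09" = true ∧
    pvMonthLen.getD "06" 0 = 30 ∧ pvMonthLen.getD "07" 0 = 31 ∧
    pvMonthLen.getD "08" 0 = 31 ∧ pvMonthLen.getD "09" 0 = 30 := by
  refine ⟨rfl, rfl, rfl, rfl, rfl, rfl, rfl, rfl⟩
theorem pvDict4Nxt : pvNxt.get? "06" = some "07" ∧ pvNxt.get? "07" = some "08" ∧
    pvNxt.get? "08" = some "09" ∧ pvNxt.get? "09" = none := by
  refine ⟨rfl, rfl, rfl, rfl⟩

-- B's state mirror of A's 8-tuple (month-keyed dicts in fixed insertion order)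
def pvEnc (s : pvSA) : pvSB :=
  (.mk [("06", s.1), ("07", s.2.1), ("08", s.2.2.1), ("09", s.2.2.2.1)],
   .mk [("06", s.2.2.2.2.1), ("07", s.2.2.2.2.2.1), ("08", s.2.2.2.2.2.2.1),
        ("09", s.2.2.2.2.2.2.2)])

-- the heart: one iteration of B = one iteration of A, through the encoding
theorem pvStep_eq (sve_retke : List (List (String × String))) (lista : List Int)
    (i : Int) (s : pvSA) :
    pvStepB sve_retke (pvEnc s) (i, PySem.List.pyGetD lista i 0) =
      pvEnc (pvStepA sve_retke lista s i) := by
  obtain ⟨r6, r7, r8, r9, d6, d7, d8, d9⟩ := s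
  cases hrow : PySem.List.pyGet? sve_retke (PySem.List.pyGetD lista i 0 - 2) with
  | none => simp [pvStepA, pvStepB, pvDolazakOdlazak?, hrow]
  | some row =>
    cases hd : (PySem.Dict.mk row).get? "dolazak" with
    | none => simp [pvStepA, pvStepB, pvDolazakOdlazak?, hrow, hd]
    | some dd =>
      cases ho : (PySem.Dict.mk row).get? "odlazak" with
      | none => simp [pvStepA, pvStepB, pvDolazakOdlazak?, hrow, hd, ho]
      | some od =>
        cases ha : PySem.Int.ofStr? (PySem.Str.slice dd (some 0) (some 2)) with
        | none => simp [pvStepA, pvStepB, pvDolazakOdlazak?, hrow, hd, ho, ha]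
        | some a =>
          cases hb : PySem.Int.ofStr? (PySem.Str.slice od (some 0) (some 2)) with
          | none => simp [pvStepA, pvStepB, pvDolazakOdlazak?, hrow, hd, ho, ha, hb]
          | some b =>
            simp only [pvStepA, pvStepB, pvDolazakOdlazak?, hrow, hd, ho, ha, hb,
              pvListaDana_eq]
            generalize PySem.Str.slice dd (some 3) (some 5) = am
            generalize PySem.Str.slice od (some 3) (some 5) = bm
            by_cases h6 : am = "06"
            · subst h6
              by_cases k7 : bm = "07"
              · subst k7
                by_cases hA : a ≤ 30 <;> by_cases hB : 1 ≤ b <;>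
                  simp [pvEnc, pvKre_eq, pvIns06, pvIns07, pvIns08, pvIns09, pvGet06, pvGet07, pvGet08, pvGet09, pvDict4Len, pvDict4Nxt,
                    pvMark_eq a b 30 (by norm_num), pvMark_eq a 30 30 (by norm_num),
                    pvMark_eq 1 b 31 (by norm_num),
                    PySem.Dict.insert_insert_self, hA, hB]
              · have k7' : ¬ ("07" = bm) := fun h => k7 h.symm
                simp [pvEnc, pvKre_eq, pvIns06, pvIns07, pvIns08, pvIns09, pvGet06, pvGet07, pvGet08, pvGet09, pvDict4Len, pvDict4Nxt,
                  pvMark_eq a b 30 (by norm_num), k7, k7']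
            · by_cases h7 : am = "07"
              · subst h7
                by_cases k8 : bm = "08"
                · subst k8
                  by_cases hA : a ≤ 31 <;> by_cases hB : 1 ≤ b <;>
                    simp [pvEnc, pvKre_eq, pvIns06, pvIns07, pvIns08, pvIns09, pvGet06, pvGet07, pvGet08, pvGet09, pvDict4Len, pvDict4Nxt,
                      pvMark_eq a b 31 (by norm_num), pvMark_eq a 31 31 (by norm_num),
                      pvMark_eq 1 b 31 (by norm_num),
                      PySem.Dict.insert_insert_self, hA, hB]
                · have k8' : ¬ ("08" = bm) := fun h => k8 h.symm
                  simp [pvEnc, pvKre_eq, pvIns06, pvIns07, pvIns08, pvIns09, pvGet06, pvGet07, pvGet08, pvGet09, pvDict4Len, pvDict4Nxt,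
                    pvMark_eq a b 31 (by norm_num), k8, k8']
              · by_cases h8 : am = "08"
                · subst h8
                  by_cases k9 : bm = "09"
                  · subst k9
                    by_cases hA : a ≤ 31 <;> by_cases hB : 1 ≤ b <;>
                      simp [pvEnc, pvKre_eq, pvIns06, pvIns07, pvIns08, pvIns09, pvGet06, pvGet07, pvGet08, pvGet09, pvDict4Len, pvDict4Nxt,
                        pvMark_eq a b 31 (by norm_num), pvMark_eq a 31 31 (by norm_num),
                        pvMark_eq 1 b 30 (by norm_num),
                        PySem.Dict.insert_insert_self, hA, hB]
                  · have k9' : ¬ ("09" = bm) := fun h => k9 h.symm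
                    simp [pvEnc, pvKre_eq, pvIns06, pvIns07, pvIns08, pvIns09, pvGet06, pvGet07, pvGet08, pvGet09, pvDict4Len, pvDict4Nxt,
                      pvMark_eq a b 31 (by norm_num), k9, k9']
                · by_cases h9 : am = "09"
                  · subst h9
                    simp [pvEnc, pvKre_eq, pvIns06, pvIns07, pvIns08, pvIns09, pvGet06, pvGet07, pvGet08, pvGet09, pvDict4Len, pvDict4Nxt,
                      pvMark_eq a b 30 (by norm_num)]
                  · have hc : pvMonthLen.contains am = false := by
                      rw [← Bool.not_eq_true, PySem.Dict.contains_iff_mem_keys]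
                      simp [pvMonthLen, h6, h7, h8, h9]
                    simp [pvEnc, hc, h6, h7, h8, h9]

theorem pvFold_eq (sve_retke : List (List (String × String))) (lista : List Int)
    (l : List Int) (s : pvSA) :
    l.foldl (fun t j => pvStepB sve_retke t (j, PySem.List.pyGetD lista j 0)) (pvEnc s) =
      pvEnc (l.foldl (pvStepA sve_retke lista) s) := by
  induction l generalizing s with
  | nil => rfl
  | cons x xs ih => simp only [List.foldl_cons, pvStep_eq, ih]

-- ===== VERDICT (by name: the statement is the Claim_ definition above) =====
theorem izvlacenje_aktivnih_spec : Claim_equal_izvlacenje_aktivnih := by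
  intro sve_retke lista _ _
  unfold Spec_izvlacenje_aktivnih izvlacenje_aktivnih izvlacenje_aktivnih_alt
  rw [PySem.List.enumerate_eq_map_pyRange lista 0, List.foldl_map]
  rw [show ((PySem.Dict.mk [("06", PySem.Dict.empty), ("07", PySem.Dict.empty),
        ("08", PySem.Dict.empty), ("09", PySem.Dict.empty)] :
          PySem.Dict String (PySem.Dict String (List String))),
       (PySem.Dict.mk [("06", ([] : List Int)), ("07", []), ("08", []), ("09", [])] :
          PySem.Dict String (List Int))) =
      pvEnc (.empty, .empty, .empty, .empty, [], [], [], []) from rfl]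
  rw [pvFold_eq]
  rfl
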